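-- pv_equiv track=rewrite | github.com/dmitryjum/codecademy_exercises | advanced_algorithms_with_python/rabin-karp_project/rabin-karp_multi_pattern.py | rabin_karp_algorithm_multiple
-- ===== SOURCE A (Python) =====
-- def polynomial_hash(s):
--   hash_value = 0
--   for i in range(len(s)):
--     hash_value += (ord(s[i])*(26**(len(s) - i - 1)))
--   return hash_value
--
-- def polynomial_rolling_hash(previous_hash, c1, c2, pattern_length):
--   return (previous_hash - ord(c1) * (26**(pattern_length - 1))) * 26 + ord(c2)
--
-- def rabin_karp_algorithm_multiple(pattern, text):
--   pattern_dict = dict()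
--   text_length = len(text)
--   for p in pattern:
--     pattern_hash = polynomial_hash(p)
--     pattern_dict[pattern_hash] = {
--       p: 0
--     }
--     pattern_length = len(p)
--     substring = text[: pattern_length]
--     substring_hash = polynomial_hash(substring)
--     if (pattern_hash == substring_hash):
--       pattern_dict[pattern_hash][p] += 1
--     for i in range(text_length - pattern_length):
--       previous_hash = substring_hash
--       substring_hash = polynomial_rolling_hash(previous_hash, text[i], text[i + pattern_length], pattern_length)
--       substring = text[i: i + pattern_length]
--       if (pattern_hash == substring_hash):
--         pattern_dict[pattern_hash][p] += 1
--   return pattern_dict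
-- ===== SOURCE B (Python) =====
-- def polynomial_hash(s):
--   hash_value = 0
--   for c in s:
--     hash_value = hash_value * 26 + ord(c)
--   return hash_value
--
-- def rabin_karp_algorithm_multiple(pattern, text):
--   pattern_dict = dict()
--   text_length = len(text)
--   for p in pattern:
--     pattern_hash = polynomial_hash(p)
--     pattern_length = len(p)
--     count = 1 if pattern_hash == polynomial_hash(text[:pattern_length]) else 0
--     for i in range(text_length - pattern_length):
--       if pattern_hash == polynomial_hash(text[i + 1 : i + 1 + pattern_length]):
--         count += 1
--     pattern_dict[pattern_hash] = {p: count}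
--   return pattern_dict
-- ===== Notes on version B (the rewrite author's own statement) =====
-- stated objective: simpler
-- what changed: Removes the rolling-hash update and its carried previous-hash state entirely: each window's polynomial hash is recomputed directly (with a Horner-form hash) and a plain per-pattern counter replaces the increment-in-dict loop, inserting the finished inner dict once.
-- outside the precondition, e.g. on rabin_karp_algorithm_multiple([''], 'aab'): A returns {0: {'': 3}}, B returns {0: {'': 4}}
import Mathlib
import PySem

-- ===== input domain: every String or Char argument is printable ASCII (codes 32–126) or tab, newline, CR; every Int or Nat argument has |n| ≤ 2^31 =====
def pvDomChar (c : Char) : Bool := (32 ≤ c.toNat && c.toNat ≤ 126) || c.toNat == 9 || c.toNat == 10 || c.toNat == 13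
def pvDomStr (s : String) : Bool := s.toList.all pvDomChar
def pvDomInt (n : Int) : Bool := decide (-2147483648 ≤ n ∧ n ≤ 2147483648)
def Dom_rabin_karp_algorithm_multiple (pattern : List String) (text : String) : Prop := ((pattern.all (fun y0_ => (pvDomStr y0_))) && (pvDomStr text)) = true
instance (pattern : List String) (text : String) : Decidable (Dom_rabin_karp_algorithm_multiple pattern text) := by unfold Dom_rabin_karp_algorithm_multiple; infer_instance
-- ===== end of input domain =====

-- B replaces A's rolling-hash state with a direct Horner-hash recomputation of every window and a
-- plain counter per pattern (objective: simpler). Equivalence is claimed on Pre_ (no empty pattern).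

-- ===== PORT A =====
-- polynomial_hash: explicit sum of ord(s[i]) * 26^(len-i-1) over i in range(len(s))
def pvPolyHashA (s : List Char) : Int :=
  (List.range s.length).foldl
    (fun h i => h + ((s.getD i ' ').toNat : Int) * (26 : Int) ^ (s.length - i - 1)) 0

-- polynomial_rolling_hash (Python's 26**(pattern_length-1); exact for pattern_length ≥ 1, the
-- only case admitted by Pre_ below — for pattern_length = 0 Python produces a float)
def pvRollA (previous_hash : Int) (c1 c2 : Char) (pattern_length : Nat) : Int :=
  (previous_hash - (c1.toNat : Int) * (26 : Int) ^ (pattern_length - 1)) * 26 + (c2.toNat : Int)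

def rabin_karp_algorithm_multiple (pattern : List String) (text : String) : List (Int × List (String × Int)) :=
  let t := text.toList
  let text_length := t.length
  let final := pattern.foldl
    (fun (d : PySem.Dict Int (PySem.Dict String Int)) p =>
      let pattern_hash := pvPolyHashA p.toList
      let d := d.insert pattern_hash (PySem.Dict.empty.insert p 0)
      let pattern_length := p.toList.length
      let substring_hash := pvPolyHashA (t.take pattern_length)   -- text[:pattern_length]
      let d := if pattern_hash == substring_hash then
                 d.modify pattern_hash PySem.Dict.empty (fun m => m.modify p 0 (· + 1))
               else d
      let st := (List.range (text_length - pattern_length)).foldl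
        (fun (st : PySem.Dict Int (PySem.Dict String Int) × Int) i =>
          let sh := pvRollA st.2 (t.getD i ' ') (t.getD (i + pattern_length) ' ') pattern_length
          let d' := if pattern_hash == sh then
                      st.1.modify pattern_hash PySem.Dict.empty (fun m => m.modify p 0 (· + 1))
                    else st.1
          (d', sh)) (d, substring_hash)
      st.1) PySem.Dict.empty
  final.items.map (fun kv => (kv.1, kv.2.items))

-- ===== PORT B =====
-- Horner-form polynomial hash (Source B's polynomial_hash)
def pvPolyHashB (s : List Char) : Int := s.foldl (fun h c => h * 26 + (c.toNat : Int)) 0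

def rabin_karp_algorithm_multiple_alt (pattern : List String) (text : String) : List (Int × List (String × Int)) :=
  let t := text.toList
  let text_length := t.length
  let final := pattern.foldl
    (fun (d : PySem.Dict Int (PySem.Dict String Int)) p =>
      let pattern_hash := pvPolyHashB p.toList
      let pattern_length := p.toList.length
      let c0 : Int := if pattern_hash == pvPolyHashB (t.take pattern_length) then 1 else 0
      let cnt := (List.range (text_length - pattern_length)).foldl
        (fun c i =>   -- text[i+1 : i+1+pattern_length]
          if pattern_hash == pvPolyHashB ((t.drop (i + 1)).take pattern_length) then c + 1 else c) c0
      d.insert pattern_hash (PySem.Dict.empty.insert p cnt)) PySem.Dict.empty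
  final.items.map (fun kv => (kv.1, kv.2.items))

-- ===== PRECONDITION & SPEC =====
-- Pre_ excludes an empty-string pattern combined with a nonempty text: on those inputs A's
-- rolling hash computes 26**(-1) = a Python float, so A's counts depend on floating-point
-- rounding and are not expressible under the integer type convention (B counts every empty
-- window instead). With an empty text the rolling loop never runs, so those inputs stay inside.
def Pre_rabin_karp_algorithm_multiple (pattern : List String) (text : String) : Prop :=
  ∀ p ∈ pattern, p ≠ "" ∨ text = ""
instance (pattern : List String) (text : String) : Decidable (Pre_rabin_karp_algorithm_multiple pattern text) := by unfold Pre_rabin_karp_algorithm_multiple; infer_instance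

def pvWitness_rabin_karp_algorithm_multiple : List String × String := (["ab", "a"], "abab")

def Spec_rabin_karp_algorithm_multiple (pattern : List String) (text : String) (out : List (Int × List (String × Int))) : Prop := out = rabin_karp_algorithm_multiple_alt pattern text
instance (pattern : List String) (text : String) (out : List (Int × List (String × Int))) : Decidable (Spec_rabin_karp_algorithm_multiple pattern text out) := by unfold Spec_rabin_karp_algorithm_multiple; infer_instance

-- ===== CLAIM (what is proved, stated in full; the proofs are below) =====
def Claim_equal_rabin_karp_algorithm_multiple : Prop := ∀ (pattern : List String) (text : String), Dom_rabin_karp_algorithm_multiple pattern text → Pre_rabin_karp_algorithm_multiple pattern text → Spec_rabin_karp_algorithm_multiple pattern text (rabin_karp_algorithm_multiple pattern text)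

-- ===== LEMMAS AND PROOFS =====

-- Horner hash from an arbitrary accumulator
theorem pvPolyHashB_init (s : List Char) (a : Int) :
    s.foldl (fun h c => h * 26 + (c.toNat : Int)) a
      = a * (26 : Int) ^ s.length + pvPolyHashB s := by
  induction s generalizing a with
  | nil => simp [pvPolyHashB]
  | cons c cs ih =>
    simp only [List.foldl_cons, List.length_cons, pvPolyHashB]
    rw [ih, ih ((0 : Int) * 26 + c.toNat)]
    ring

-- appending one character to a Horner hash
theorem pvPolyHashB_append_singleton (s : List Char) (c : Char) :
    pvPolyHashB (s ++ [c]) = pvPolyHashB s * 26 + (c.toNat : Int) := by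
  simp [pvPolyHashB]

-- prepending one character
theorem pvPolyHashB_cons (c : Char) (s : List Char) :
    pvPolyHashB (c :: s) = (c.toNat : Int) * (26 : Int) ^ s.length + pvPolyHashB s := by
  rw [show pvPolyHashB (c :: s)
        = s.foldl (fun h c => h * 26 + (c.toNat : Int)) ((0 : Int) * 26 + (c.toNat : Int)) from rfl,
      pvPolyHashB_init]
  ring

-- the two hash functions agree
theorem pvPolyHash_eq (s : List Char) : pvPolyHashA s = pvPolyHashB s := by
  have hsum : ∀ (l : List Char), pvPolyHashA l
      = ((List.range l.length).map
          (fun i => ((l.getD i ' ').toNat : Int) * (26 : Int) ^ (l.length - i - 1))).sum := by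
    intro l
    rw [pvPolyHashA, List.sum_eq_foldl, List.foldl_map]
  induction s with
  | nil => simp [pvPolyHashA, pvPolyHashB]
  | cons c cs ih =>
    rw [hsum, pvPolyHashB_cons, ← ih, hsum]
    simp only [List.length_cons, List.range_succ_eq_map, List.map_cons, List.map_map,
      List.sum_cons]
    have hmap : ((List.range cs.length).map
        ((fun i => (((c :: cs).getD i ' ').toNat : Int) * (26 : Int) ^ (cs.length + 1 - i - 1))
          ∘ Nat.succ))
        = (List.range cs.length).map
            (fun i => ((cs.getD i ' ').toNat : Int) * (26 : Int) ^ (cs.length - i - 1)) := by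
      apply List.map_congr_left
      intro i _
      simp only [Function.comp, List.getD_cons_succ,
        show cs.length + 1 - (i + 1) - 1 = cs.length - i - 1 from by omega]
    rw [hmap]
    simp

-- the rolled hash equals the directly recomputed hash of the next window
theorem pvRoll_correct (t : List Char) (pl i : Nat) (hpl : 1 ≤ pl) (hi : i + pl < t.length) :
    pvRollA (pvPolyHashB ((t.drop i).take pl)) (t.getD i ' ') (t.getD (i + pl) ' ') pl
      = pvPolyHashB ((t.drop (i + 1)).take pl) := by
  obtain ⟨m, rfl⟩ : ∃ m, pl = m + 1 := ⟨pl - 1, by omega⟩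
  have hlen : i < t.length := by omega
  have hd : t.drop i = t[i] :: t.drop (i + 1) := List.drop_eq_getElem_cons hlen
  have hwin : (t.drop i).take (m + 1) = t[i] :: (t.drop (i + 1)).take m := by
    rw [hd, List.take_succ_cons]
  have hwin2 : (t.drop (i + 1)).take (m + 1) = (t.drop (i + 1)).take m ++ [t[i + (m + 1)]] := by
    rw [List.take_add_one, List.getElem?_drop, show i + 1 + m = i + (m + 1) from by omega,
        List.getElem?_eq_getElem hi]
    rfl
  have hg1 : t.getD i ' ' = t[i] := List.getD_eq_getElem t ' ' hlen
  have hg2 : t.getD (i + (m + 1)) ' ' = t[i + (m + 1)] := List.getD_eq_getElem t ' ' hi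
  have hlentake : ((t.drop (i + 1)).take m).length = m := by
    simp
    omega
  rw [hwin, hwin2, hg1, hg2, pvRollA, pvPolyHashB_cons, pvPolyHashB_append_singleton, hlentake]
  simp only [Nat.add_sub_cancel]
  ring

-- modify at a just-inserted key rewrites the inserted value in place
theorem pv_modify_insert {κ ν : Type} [BEq κ] [LawfulBEq κ]
    (d : PySem.Dict κ ν) (k : κ) (v : ν) (d0 : ν) (f : ν → ν) :
    (d.insert k v).modify k d0 f = d.insert k (f v) := by
  rw [show (d.insert k v).modify k d0 f = (d.insert k v).insert k (f ((d.insert k v).getD k d0)) from rfl,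
      PySem.Dict.insert_insert_self, PySem.Dict.getD_insert_self]

-- loop invariant: A's rolling loop keeps the dict equal to 'insert the running count' and the
-- carried hash equal to the directly recomputed hash of the current window
theorem pv_loop_eq (t : List Char) (pl : Nat) (hpl : 1 ≤ pl)
    (d : PySem.Dict Int (PySem.Dict String Int)) (ph : Int) (p : String) (c0 : Int)
    (m : Nat) (hm : m ≤ t.length - pl) :
    (List.range m).foldl
      (fun (st : PySem.Dict Int (PySem.Dict String Int) × Int) i =>
        let sh := pvRollA st.2 (t.getD i ' ') (t.getD (i + pl) ' ') pl
        let d' := if ph == sh then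
                    st.1.modify ph PySem.Dict.empty (fun m => m.modify p 0 (· + 1))
                  else st.1
        (d', sh))
      (d.insert ph (PySem.Dict.empty.insert p c0), pvPolyHashB (t.take pl))
    = (d.insert ph (PySem.Dict.empty.insert p
        ((List.range m).foldl
          (fun c i => if ph == pvPolyHashB ((t.drop (i + 1)).take pl) then c + 1 else c) c0)),
       pvPolyHashB ((t.drop m).take pl)) := by
  induction m with
  | zero => simp
  | succ m ih =>
    have hm' : m ≤ t.length - pl := by omega
    have hlt : m + pl < t.length := by omega
    rw [List.range_succ, List.foldl_append, List.foldl_append, ih hm']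
    simp only [List.foldl_cons, List.foldl_nil]
    rw [pvRoll_correct t pl m hpl hlt]
    by_cases h : ph == pvPolyHashB ((t.drop (m + 1)).take pl)
    · simp only [h, if_pos,
        pv_modify_insert, pv_modify_insert (PySem.Dict.empty (κ := String) (ν := Int))]
    · simp [h]

-- per-pattern step functions agree for a nonempty pattern
theorem pv_step_eq (t : List Char) (p : String) (hp : p ≠ "" ∨ t = [])
    (d : PySem.Dict Int (PySem.Dict String Int)) :
    (let pattern_hash := pvPolyHashA p.toList
     let d := d.insert pattern_hash (PySem.Dict.empty.insert p 0)
     let pattern_length := p.toList.length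
     let substring_hash := pvPolyHashA (t.take pattern_length)
     let d := if pattern_hash == substring_hash then
                d.modify pattern_hash PySem.Dict.empty (fun m => m.modify p 0 (· + 1))
              else d
     let st := (List.range (t.length - pattern_length)).foldl
       (fun (st : PySem.Dict Int (PySem.Dict String Int) × Int) i =>
         let sh := pvRollA st.2 (t.getD i ' ') (t.getD (i + pattern_length) ' ') pattern_length
         let d' := if pattern_hash == sh then
                     st.1.modify pattern_hash PySem.Dict.empty (fun m => m.modify p 0 (· + 1))
                   else st.1
         (d', sh)) (d, substring_hash)
     st.1)
    = (let pattern_hash := pvPolyHashB p.toList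
       let pattern_length := p.toList.length
       let c0 : Int := if pattern_hash == pvPolyHashB (t.take pattern_length) then 1 else 0
       let cnt := (List.range (t.length - pattern_length)).foldl
         (fun c i =>
           if pattern_hash == pvPolyHashB ((t.drop (i + 1)).take pattern_length) then c + 1 else c) c0
       d.insert pattern_hash (PySem.Dict.empty.insert p cnt)) := by
  simp only [pvPolyHash_eq]
  set ph := pvPolyHashB p.toList with hph
  set pl := p.toList.length with hplen
  -- normalise the first-window branch to 'insert with count c0'
  have hfirst :
      (if ph == pvPolyHashB (t.take pl) then
         (d.insert ph (PySem.Dict.empty.insert p 0)).modify ph PySem.Dict.empty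
           (fun m => m.modify p 0 (· + 1))
       else d.insert ph (PySem.Dict.empty.insert p 0))
      = d.insert ph (PySem.Dict.empty.insert p
          (if ph == pvPolyHashB (t.take pl) then 1 else 0)) := by
    by_cases h : ph == pvPolyHashB (t.take pl)
    · simp only [h, if_pos,
        pv_modify_insert, pv_modify_insert (PySem.Dict.empty (κ := String) (ν := Int)), zero_add]
    · simp [h]
  rw [hfirst]
  rcases hp with hp | rfl
  · have hpl : 1 ≤ pl := by
      rw [hplen]
      cases hl : p.toList with
      | nil => exact absurd (by rw [← String.ofList_toList (s := p), hl]) hp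
      | cons a l => simp
    have := pv_loop_eq t pl hpl d ph p
      (if ph == pvPolyHashB (t.take pl) then 1 else 0) (t.length - pl) (le_refl _)
    rw [this]
  · -- empty text: the rolling loop is empty
    simp

-- ===== VERDICT (by name: the statement is the Claim_ definition above) =====
theorem pv_fold_eq (t : List Char) (pattern : List String)
    (hPre : ∀ p ∈ pattern, p ≠ "" ∨ t = []) (d : PySem.Dict Int (PySem.Dict String Int)) :
    pattern.foldl
      (fun (d : PySem.Dict Int (PySem.Dict String Int)) p =>
        let pattern_hash := pvPolyHashA p.toList
        let d := d.insert pattern_hash (PySem.Dict.empty.insert p 0)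
        let pattern_length := p.toList.length
        let substring_hash := pvPolyHashA (t.take pattern_length)
        let d := if pattern_hash == substring_hash then
                   d.modify pattern_hash PySem.Dict.empty (fun m => m.modify p 0 (· + 1))
                 else d
        let st := (List.range (t.length - pattern_length)).foldl
          (fun (st : PySem.Dict Int (PySem.Dict String Int) × Int) i =>
            let sh := pvRollA st.2 (t.getD i ' ') (t.getD (i + pattern_length) ' ') pattern_length
            let d' := if pattern_hash == sh then
                        st.1.modify pattern_hash PySem.Dict.empty (fun m => m.modify p 0 (· + 1))
                      else st.1
            (d', sh)) (d, substring_hash)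
        st.1) d
    = pattern.foldl
      (fun (d : PySem.Dict Int (PySem.Dict String Int)) p =>
        let pattern_hash := pvPolyHashB p.toList
        let pattern_length := p.toList.length
        let c0 : Int := if pattern_hash == pvPolyHashB (t.take pattern_length) then 1 else 0
        let cnt := (List.range (t.length - pattern_length)).foldl
          (fun c i =>
            if pattern_hash == pvPolyHashB ((t.drop (i + 1)).take pattern_length) then c + 1 else c) c0
        d.insert pattern_hash (PySem.Dict.empty.insert p cnt)) d := by
  induction pattern generalizing d with
  | nil => rfl
  | cons p ps ih =>
    simp only [List.foldl_cons]
    rw [pv_step_eq t p (hPre p (by simp)) d]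
    exact ih (fun q hq => hPre q (by simp [hq])) _

theorem rabin_karp_algorithm_multiple_spec : Claim_equal_rabin_karp_algorithm_multiple := by
  intro pattern text _hDom hPre
  unfold Spec_rabin_karp_algorithm_multiple
  unfold rabin_karp_algorithm_multiple rabin_karp_algorithm_multiple_alt
  simp only []
  rw [pv_fold_eq text.toList pattern (by
    intro p hp
    rcases hPre p hp with h | h
    · exact Or.inl h
    · exact Or.inr (by rw [h]; rfl))]
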